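-- pv_equiv track=rewrite | github.com/ranwez/GeneModelTransfer | SCRIPT/VR/prot_prediction_scoring.py | replace_zeros_near_non_zeros
-- ===== SOURCE A (Python) =====
-- def replace_zeros_near_non_zeros(tab, window_size):
--     new_tab = tab[:]
--     for i in range(len(tab)):
--         if tab[i] == 0:
--             start = max(0, i - window_size)
--             end = min(len(tab), i + window_size + 1)
--             # Check if there is any non-zero value in the window
--             if any(tab[j] != 0 for j in range(start, end)):
--                 new_tab[i] = 3
--
--     return new_tab
-- ===== SOURCE B (Python) =====
-- def replace_zeros_near_non_zeros(tab, window_size):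
--     n = len(tab)
--     # prefix[k] = number of non-zero entries among tab[:k]
--     prefix = [0]
--     for v in tab:
--         prefix.append(prefix[-1] + (1 if v != 0 else 0))
--     out = []
--     for i, v in enumerate(tab):
--         s = max(0, i - window_size)
--         e = min(n, i + window_size + 1)
--         if v == 0 and s < e and prefix[e] - prefix[s] > 0:
--             out.append(3)
--         else:
--             out.append(v)
--     return out
-- ===== Notes on version B (the rewrite author's own statement) =====
-- stated objective: alternative
-- what changed: Replaces A's per-zero inner window scan with a one-pass prefix-sum of non-zero flags, answering each window query in O(1) and building the output in a single pass instead of mutating a copy.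
import Mathlib
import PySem

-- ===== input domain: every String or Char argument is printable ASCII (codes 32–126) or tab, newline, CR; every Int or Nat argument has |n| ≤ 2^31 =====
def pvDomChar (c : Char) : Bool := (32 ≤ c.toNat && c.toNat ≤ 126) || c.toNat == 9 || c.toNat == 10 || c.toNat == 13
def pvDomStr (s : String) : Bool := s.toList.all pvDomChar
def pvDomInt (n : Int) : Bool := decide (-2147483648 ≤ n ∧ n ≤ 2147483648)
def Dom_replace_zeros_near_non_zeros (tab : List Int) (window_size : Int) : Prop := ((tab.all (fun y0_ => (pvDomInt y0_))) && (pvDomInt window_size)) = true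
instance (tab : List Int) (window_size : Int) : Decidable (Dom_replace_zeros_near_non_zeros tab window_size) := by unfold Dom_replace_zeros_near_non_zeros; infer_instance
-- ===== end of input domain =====

-- B replaces A's per-zero inner window scan by a one-pass prefix-sum of non-zero
-- flags, answering each window query in O(1) (objective: alternative algorithm).

-- ===== PORT A =====
def replace_zeros_near_non_zeros (tab : List Int) (window_size : Int) : List Int :=
  (PySem.List.pyRange 0 (tab.length : Int) 1).foldl
    (fun new_tab i =>
      if PySem.List.pyGetD tab i 0 = 0 then
        let start := max 0 (i - window_size)
        let stop := min (tab.length : Int) (i + window_size + 1)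
        if (PySem.List.pyRange start stop 1).any
            (fun j => PySem.List.pyGetD tab j 0 != 0) then
          PySem.List.pySetD new_tab i 3
        else new_tab
      else new_tab)
    tab

-- ===== PORT B =====
def replace_zeros_near_non_zeros_alt (tab : List Int) (window_size : Int) : List Int :=
  let n : Int := tab.length
  -- prefix[k] = number of non-zero entries among tab[:k]
  let pfx := List.scanl (fun acc v => acc + (if v ≠ 0 then 1 else 0)) (0 : Int) tab
  (PySem.List.enumerate tab).map (fun iv =>
    let i := iv.1
    let v := iv.2
    let s := max 0 (i - window_size)
    let e := min n (i + window_size + 1)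
    if v = 0 ∧ s < e ∧ 0 < pfx.getD e.toNat 0 - pfx.getD s.toNat 0 then 3 else v)

-- ===== PRECONDITION & SPEC =====
def Spec_replace_zeros_near_non_zeros (tab : List Int) (window_size : Int) (out : List Int) : Prop := out = replace_zeros_near_non_zeros_alt tab window_size
instance (tab : List Int) (window_size : Int) (out : List Int) : Decidable (Spec_replace_zeros_near_non_zeros tab window_size out) := by unfold Spec_replace_zeros_near_non_zeros; infer_instance

-- ===== CLAIM (what is proved, stated in full; the proofs are below) =====
def Claim_equal_replace_zeros_near_non_zeros : Prop := ∀ (tab : List Int) (window_size : Int), Dom_replace_zeros_near_non_zeros tab window_size → Spec_replace_zeros_near_non_zeros tab window_size (replace_zeros_near_non_zeros tab window_size)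

-- ===== LEMMAS AND PROOFS =====

-- A's per-index condition: tab[i] == 0 and some non-zero value in the window.
def condA (tab : List Int) (w i : Int) : Bool :=
  (PySem.List.pyGetD tab i 0 == 0) &&
  (PySem.List.pyRange (max 0 (i - w)) (min (tab.length : Int) (i + w + 1)) 1).any
    (fun j => PySem.List.pyGetD tab j 0 != 0)

lemma condA_eq_true (tab : List Int) (w i : Int) :
    condA tab w i = true ↔
    (PySem.List.pyGetD tab i 0 = 0 ∧
     (PySem.List.pyRange (max 0 (i - w)) (min (tab.length : Int) (i + w + 1)) 1).any
       (fun j => PySem.List.pyGetD tab j 0 != 0) = true) := by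
  simp [condA]

-- identity map through getD over range
lemma map_getD_range (xs : List Int) :
    (List.range xs.length).map (fun j => xs.getD j 0) = xs := by
  apply List.ext_getElem
  · simp
  · intro j h1 h2
    simp [List.getD_eq_getElem?_getD, List.getElem?_eq_getElem h2]

-- fold invariant for A
lemma A_fold_inv (tab : List Int) (w : Int) (m : Nat) (hm : m ≤ tab.length) :
    (PySem.List.pyRange 0 (m : Int) 1).foldl
      (fun new_tab i =>
        if PySem.List.pyGetD tab i 0 = 0 then
          let start := max 0 (i - w)
          let stop := min (tab.length : Int) (i + w + 1)
          if (PySem.List.pyRange start stop 1).any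
              (fun j => PySem.List.pyGetD tab j 0 != 0) then
            PySem.List.pySetD new_tab i 3
          else new_tab
        else new_tab)
      tab
    = (List.range tab.length).map
        (fun j : Nat => if j < m ∧ condA tab w (j : Int) = true then 3 else tab.getD j 0) := by
  induction m with
  | zero =>
      rw [PySem.List.pyRange_one_eq_nil (by omega)]
      simp only [List.foldl_nil]
      conv_lhs => rw [← map_getD_range tab]
      apply List.map_congr_left
      intro j hj
      simp
  | succ m ih =>
      have h1 : ((m : Int) + 1 : Int) = ((m + 1 : Nat) : Int) := by push_cast; ring
      rw [← h1, PySem.List.pyRange_one_succ_right (by omega), List.foldl_append,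
        ih (by omega)]
      simp only [List.foldl_cons, List.foldl_nil]
      by_cases hc : condA tab w (m : Int) = true
      · obtain ⟨hc1, hc2⟩ := (condA_eq_true tab w (m : Int)).mp hc
        rw [if_pos hc1]
        simp only [hc2, if_true]
        rw [PySem.List.pySetD_natCast]
        apply List.ext_getElem
        · simp
        · intro j _ _
          rw [List.getElem_set]
          by_cases hjm : j = m
          · subst hjm
            simp only [List.getElem_map, List.getElem_range]
            exact (if_pos ⟨Nat.lt_succ_self j, hc⟩).symm
          · simp only [List.getElem_map, List.getElem_range]
            rw [if_neg (fun h => hjm h.symm)]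
            apply if_congr _ rfl rfl
            constructor <;> rintro ⟨h, h'⟩ <;> exact ⟨by omega, h'⟩
      · have step_eq :
            (if PySem.List.pyGetD tab (m : Int) 0 = 0 then
              if (PySem.List.pyRange (max 0 ((m : Int) - w)) (min (tab.length : Int) ((m : Int) + w + 1)) 1).any
                  (fun j => PySem.List.pyGetD tab j 0 != 0) then
                PySem.List.pySetD
                  ((List.range tab.length).map
                    (fun j : Nat => if j < m ∧ condA tab w (j : Int) = true then 3 else tab.getD j 0)) (m : Int) 3
              else
                (List.range tab.length).map
                  (fun j : Nat => if j < m ∧ condA tab w (j : Int) = true then 3 else tab.getD j 0)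
            else
              (List.range tab.length).map
                (fun j : Nat => if j < m ∧ condA tab w (j : Int) = true then 3 else tab.getD j 0))
            = (List.range tab.length).map
                (fun j : Nat => if j < m ∧ condA tab w (j : Int) = true then 3 else tab.getD j 0) := by
          by_cases h0 : PySem.List.pyGetD tab (m : Int) 0 = 0
          · rw [if_pos h0]
            have : ¬ ((PySem.List.pyRange (max 0 ((m : Int) - w)) (min (tab.length : Int) ((m : Int) + w + 1)) 1).any
                (fun j => PySem.List.pyGetD tab j 0 != 0) = true) := by
              intro h; exact hc ((condA_eq_true tab w (m : Int)).mpr ⟨h0, h⟩)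
            rw [if_neg this]
          · rw [if_neg h0]
        rw [step_eq]
        apply List.map_congr_left
        intro j hj
        apply if_congr _ rfl rfl
        constructor
        · rintro ⟨h, h'⟩
          by_cases hjm : j = m
          · subst hjm; exact absurd h' hc
          · exact ⟨by omega, h'⟩
        · rintro ⟨h, h'⟩
          by_cases hjm : j = m
          · subst hjm; exact absurd h' hc
          · exact ⟨by omega, h'⟩

lemma A_eq (tab : List Int) (w : Int) :
    replace_zeros_near_non_zeros tab w
    = (List.range tab.length).map
        (fun j : Nat => if condA tab w (j : Int) = true then 3 else tab.getD j 0) := by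
  unfold replace_zeros_near_non_zeros
  rw [A_fold_inv tab w tab.length le_rfl]
  apply List.map_congr_left
  intro j hj
  simp only [List.mem_range] at hj
  apply if_congr _ rfl rfl
  exact ⟨fun ⟨_, h⟩ => h, fun h => ⟨hj, h⟩⟩

-- enumerate-map as a range-map
lemma enumerate_map_eq (xs : List Int) (f : Int × Int → Int) (s : Int) :
    (PySem.List.enumerate xs s).map f
    = (List.range xs.length).map (fun j : Nat => f (s + (j : Int), xs.getD j 0)) := by
  induction xs generalizing s with
  | nil => simp [PySem.List.enumerate_nil]
  | cons x xs ih =>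
      rw [PySem.List.enumerate_cons, List.map_cons, ih (s + 1)]
      simp only [List.length_cons, List.range_succ_eq_map, List.map_cons, List.map_map]
      congr 1
      · norm_num
      · apply List.map_congr_left
        intro j _
        simp only [Function.comp_apply, List.getD_cons_succ]
        congr 2
        push_cast; ring

-- prefix value: scanl computes counts of non-zeros in prefixes
lemma scanl_getD (l : List Int) (c : Int) (k : Nat) (hk : k ≤ l.length) :
    (List.scanl (fun acc v => acc + (if v ≠ 0 then 1 else 0)) c l).getD k 0
    = c + (((l.take k).countP (fun v => decide (v ≠ 0)) : Nat) : Int) := by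
  induction l generalizing c k with
  | nil =>
      have hk0 : k = 0 := by simpa using hk
      subst hk0
      simp [List.scanl]
  | cons x xs ih =>
      cases k with
      | zero => simp [List.scanl]
      | succ k =>
          rw [List.scanl_cons, List.getD_cons_succ, ih _ k (by simpa using hk)]
          rw [List.take_succ_cons, List.countP_cons]
          by_cases hx : x ≠ 0 <;> simp [hx] <;> try ring

-- any over a window range as an existential
lemma any_range_iff (tab : List Int) (s e : Int) (hs : 0 ≤ s) (_he : e ≤ (tab.length : Int)) :
    ((PySem.List.pyRange s e 1).any (fun j => PySem.List.pyGetD tab j 0 != 0) = true)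
    ↔ ∃ k : Nat, s ≤ (k : Int) ∧ (k : Int) < e ∧ tab.getD k 0 ≠ 0 := by
  rw [List.any_eq_true]
  constructor
  · rintro ⟨x, hx, hnz⟩
    rw [PySem.List.mem_pyRange_one] at hx
    refine ⟨x.toNat, by omega, by omega, ?_⟩
    have hx0 : x = ((x.toNat : Nat) : Int) := by omega
    rw [hx0, PySem.List.pyGetD_natCast] at hnz
    simpa using hnz
  · rintro ⟨k, hk1, hk2, hk3⟩
    refine ⟨(k : Int), ?_, ?_⟩
    · rw [PySem.List.mem_pyRange_one]; exact ⟨hk1, hk2⟩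
    · rw [PySem.List.pyGetD_natCast]; simpa using hk3

-- positive count difference as an existential
lemma count_diff_pos_iff (tab : List Int) (s' e' : Nat) (hse : s' ≤ e') (he : e' ≤ tab.length) :
    ((tab.take s').countP (fun v => decide (v ≠ 0)) < (tab.take e').countP (fun v => decide (v ≠ 0)))
    ↔ ∃ k : Nat, s' ≤ k ∧ k < e' ∧ tab.getD k 0 ≠ 0 := by
  have hsplit : tab.take e' = tab.take s' ++ (tab.drop s').take (e' - s') := by
    rw [← List.take_add]
    congr 1
    omega
  rw [hsplit, List.countP_append]
  constructor
  · intro h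
    have hpos : 0 < ((tab.drop s').take (e' - s')).countP (fun v => decide (v ≠ 0)) := by omega
    rw [List.countP_pos_iff] at hpos
    obtain ⟨a, ha, hnz⟩ := hpos
    rw [List.mem_iff_getElem] at ha
    obtain ⟨t, ht, hat⟩ := ha
    have htlen : t < tab.length - s' := by
      have := ht
      simp only [List.length_take, List.length_drop] at this
      omega
    refine ⟨s' + t, by omega, ?_, ?_⟩
    · have := ht; simp only [List.length_take, List.length_drop] at this; omega
    · rw [List.getElem_take] at hat
      rw [List.getElem_drop] at hat
      rw [List.getD_eq_getElem _ _ (by omega), hat]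
      simpa using hnz
  · rintro ⟨k, hk1, hk2, hk3⟩
    have hklen : k < tab.length := by omega
    have hmem : tab[k] ∈ (tab.drop s').take (e' - s') := by
      rw [List.mem_iff_getElem]
      refine ⟨k - s', ?_, ?_⟩
      · simp only [List.length_take, List.length_drop]; omega
      · rw [List.getElem_take, List.getElem_drop]
        congr 1
        omega
    have hpos : 0 < ((tab.drop s').take (e' - s')).countP (fun v => decide (v ≠ 0)) := by
      rw [List.countP_pos_iff]
      refine ⟨tab[k], hmem, ?_⟩
      rw [List.getD_eq_getElem _ _ hklen] at hk3
      simpa using hk3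
    omega

-- ===== VERDICT (by name: the statement is the Claim_ definition above) =====
theorem replace_zeros_near_non_zeros_spec : Claim_equal_replace_zeros_near_non_zeros := by
  intro tab w _
  unfold Spec_replace_zeros_near_non_zeros
  unfold replace_zeros_near_non_zeros_alt
  rw [A_eq, enumerate_map_eq]
  apply List.map_congr_left
  intro j hj
  simp only [zero_add]
  have hget : PySem.List.pyGetD tab (j : Int) 0 = tab.getD j 0 := PySem.List.pyGetD_natCast tab j 0
  set s := max 0 ((j : Int) - w) with hs
  set e := min (tab.length : Int) ((j : Int) + w + 1) with he
  have hs0 : 0 ≤ s := le_max_left _ _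
  have hen : e ≤ (tab.length : Int) := min_le_left _ _
  by_cases hv : tab.getD j 0 = 0
  · by_cases hse : s < e
    · -- window non-empty: compare via prefix counts
      have he0 : 0 ≤ e := le_of_lt (lt_of_le_of_lt hs0 hse)
      have hA : condA tab w (j : Int) = true ↔ ∃ k : Nat, s ≤ (k : Int) ∧ (k : Int) < e ∧ tab.getD k 0 ≠ 0 := by
        rw [condA_eq_true, ← hs, ← he, hget]
        constructor
        · rintro ⟨_, h⟩; exact (any_range_iff tab s e hs0 hen).mp h
        · intro h; exact ⟨hv, (any_range_iff tab s e hs0 hen).mpr h⟩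
      rw [scanl_getD _ _ _ (by omega), scanl_getD _ _ _ (by omega)]
      have hB : (0 : Int) <
          (0 + (((tab.take e.toNat).countP (fun v => decide (v ≠ 0)) : Nat) : Int))
          - (0 + (((tab.take s.toNat).countP (fun v => decide (v ≠ 0)) : Nat) : Int))
          ↔ ∃ k : Nat, s.toNat ≤ k ∧ k < e.toNat ∧ tab.getD k 0 ≠ 0 := by
        rw [show ((0 : Int) <
            (0 + (((tab.take e.toNat).countP (fun v => decide (v ≠ 0)) : Nat) : Int))
            - (0 + (((tab.take s.toNat).countP (fun v => decide (v ≠ 0)) : Nat) : Int)))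
            ↔ ((tab.take s.toNat).countP (fun v => decide (v ≠ 0)) <
               (tab.take e.toNat).countP (fun v => decide (v ≠ 0))) from by omega]
        exact count_diff_pos_iff tab s.toNat e.toNat (by omega) (by omega)
      apply if_congr _ rfl rfl
      rw [hA, hB]
      constructor
      · rintro ⟨k, h1, h2, h3⟩
        exact ⟨hv, hse, ⟨k, by omega, by omega, h3⟩⟩
      · rintro ⟨_, _, k, h1, h2, h3⟩
        exact ⟨k, by omega, by omega, h3⟩
    · -- empty window: both sides give tab[j]
      have hAfalse : ¬ condA tab w (j : Int) = true := by
        rw [condA_eq_true, ← hs, ← he]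
        rintro ⟨_, h⟩
        rw [PySem.List.pyRange_one_eq_nil (by omega)] at h
        simp at h
      rw [if_neg hAfalse, if_neg (by rintro ⟨_, h, _⟩; exact hse h)]
  · have hAfalse : ¬ condA tab w (j : Int) = true := by
      rw [condA_eq_true, hget]; rintro ⟨h, _⟩; exact hv h
    rw [if_neg hAfalse, if_neg (by rintro ⟨h, _⟩; exact hv h)]
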